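-- pv_equiv track=rewrite | github.com/MrBrantCode/unitest_baseline | mut_generate/mist_train_cf/cf_7606/solution.py | longest_vowel_string
-- ===== SOURCE A (Python) =====
-- def longest_vowel_string(strings):
--     vowels = {'a', 'e', 'i', 'o', 'u'}
--     longest_string = ""
--
--     for string in strings:
--         if len(string) > 3 and string[0] in vowels:
--             for i in range(len(string) - 1):
--                 if string[i] == string[i+1]:
--                     if len(string) > len(longest_string):
--                         longest_string = string
--                     break
--
--     return longest_string
-- ===== SOURCE B (Python) =====
-- def longest_vowel_string(strings):
--     def ok(s):
--         return len(s) > 3 and s[0] in "aeiou" and any(a == b for a, b in zip(s, s[1:]))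
--     return next((s for s in sorted(strings, key=len, reverse=True) if ok(s)), "")
-- ===== Notes on version B (the rewrite author's own statement) =====
-- stated objective: alternative
-- what changed: Replaces A's single-pass max-tracking loop with an index-pair inner scan by a sort-then-first-match strategy: stable-sort the list by length descending and return the first string that starts with a vowel, has length > 3 and an adjacent duplicate (detected by zipping the string with its own tail); stability of Python's sort reproduces A's strict-'>' tie behaviour.
import Mathlib
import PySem

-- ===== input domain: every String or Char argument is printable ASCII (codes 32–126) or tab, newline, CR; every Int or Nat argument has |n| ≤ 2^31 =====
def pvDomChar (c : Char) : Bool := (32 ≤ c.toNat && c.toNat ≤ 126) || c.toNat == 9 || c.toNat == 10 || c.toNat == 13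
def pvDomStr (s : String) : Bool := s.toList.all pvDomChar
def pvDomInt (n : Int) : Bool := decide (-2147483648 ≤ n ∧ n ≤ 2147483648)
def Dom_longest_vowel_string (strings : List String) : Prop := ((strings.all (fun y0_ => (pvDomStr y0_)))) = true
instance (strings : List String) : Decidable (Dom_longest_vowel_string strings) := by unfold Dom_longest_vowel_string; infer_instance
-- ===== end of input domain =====

-- B replaces A's max-tracking scan by "sort descending by length (stable), return
-- the first qualifying string"; objective: an alternative selection strategy, same answer.

-- ===== PORT A =====
-- A's guard: len(string) > 3 and string[0] in vowels  (short-circuit: head exists when taken)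
def pvAGuard (s : String) : Bool :=
  decide (s.toList.length > 3) &&
    (match s.toList with
     | c :: _ => c = 'a' || c = 'e' || c = 'i' || c = 'o' || c = 'u'
     | [] => false)

-- A's inner loop: for i in range(len(string)-1): if string[i]==string[i+1]: maybe update; break
def pvAScan (cs : List Char) (str longest : String) : String :=
  match cs with
  | c1 :: c2 :: rest =>
      if c1 = c2 then
        (if str.toList.length > longest.toList.length then str else longest)
      else pvAScan (c2 :: rest) str longest
  | _ => longest

def longest_vowel_string (strings : List String) : String :=
  strings.foldl
    (fun longest_string s =>
      if pvAGuard s then pvAScan s.toList s longest_string else longest_string)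
    ""

-- ===== PORT B =====
-- B's guard: len(s) > 3 and s[0] in "aeiou" and any(a == b for a, b in zip(s, s[1:]))
-- (s[1:] on a string is exactly the tail of its character list)
def pvOk (s : String) : Bool :=
  decide (s.toList.length > 3) &&
    (match s.toList with
     | c :: _ => ("aeiou".toList).contains c
     | [] => false) &&
    ((s.toList.zip s.toList.tail).any (fun p => p.1 == p.2))

-- next((s for s in sorted(strings, key=len, reverse=True) if ok(s)), "")
def longest_vowel_string_alt (strings : List String) : String :=
  ((PySem.List.sorted strings (fun s => PySem.Str.len s) true).find? pvOk).getD ""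

-- ===== PRECONDITION & SPEC =====
def Spec_longest_vowel_string (strings : List String) (out : String) : Prop := out = longest_vowel_string_alt strings
instance (strings : List String) (out : String) : Decidable (Spec_longest_vowel_string strings out) := by unfold Spec_longest_vowel_string; infer_instance

-- ===== CLAIM (what is proved, stated in full; the proofs are below) =====
def Claim_equal_longest_vowel_string : Prop := ∀ (strings : List String), Dom_longest_vowel_string strings → Spec_longest_vowel_string strings (longest_vowel_string strings)

-- ===== LEMMAS AND PROOFS =====

-- pairwise adjacent-duplicate predicate (the semantic content of both duplicate tests)
def pvAdj : List Char → Bool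
  | c1 :: c2 :: rest => c1 = c2 || pvAdj (c2 :: rest)
  | _ => false

theorem pvZipAny_eq_adj (cs : List Char) :
    (cs.zip cs.tail).any (fun p => p.1 == p.2) = pvAdj cs := by
  induction cs with
  | nil => simp [pvAdj]
  | cons c rest ih =>
    cases rest with
    | nil => simp [pvAdj]
    | cons d r => simp [pvAdj, ← ih, Bool.beq_eq_decide_eq]

theorem pvOk_eq (s : String) : pvOk s = (pvAGuard s && pvAdj s.toList) := by
  unfold pvOk pvAGuard
  rw [pvZipAny_eq_adj]
  cases s.toList with
  | nil => simp
  | cons c cs => simp [Bool.or_assoc]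

theorem pvAScan_eq (cs : List Char) (str longest : String) :
    pvAScan cs str longest =
      if pvAdj cs then
        (if str.toList.length > longest.toList.length then str else longest)
      else longest := by
  induction cs with
  | nil => simp [pvAScan, pvAdj]
  | cons c rest ih =>
    cases rest with
    | nil => simp [pvAScan, pvAdj]
    | cons d r =>
      by_cases h : c = d
      · simp [pvAScan, pvAdj, h]
      · simp [pvAScan, pvAdj, h, ih]

-- optional "current best" step: what A does to its accumulator, on Option String
def pvStep (acc : Option String) (s : String) : Option String :=
  if pvOk s then
    match acc with
    | none => some s
    | some b => if s.toList.length > b.toList.length then some s else some b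
  else acc

-- the two ports apply the same per-element update
theorem pvFun_eq :
    (fun (longest : String) s => if pvAGuard s then pvAScan s.toList s longest else longest) =
      (fun (longest : String) s =>
        if pvOk s then
          (if s.toList.length > longest.toList.length then s else longest)
        else longest) := by
  funext longest s
  rw [pvAScan_eq, pvOk_eq]
  by_cases hg : pvAGuard s = true <;> by_cases ha : pvAdj s.toList = true <;>
    simp [hg, ha]

theorem pvFold_some (l : List String) (b : String) :
    l.foldl
        (fun (longest : String) s =>
          if pvOk s then
            (if s.toList.length > longest.toList.length then s else longest)
          else longest) b =
      (l.foldl pvStep (some b)).getD "" := by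
  induction l generalizing b with
  | nil => rfl
  | cons s l ih =>
    by_cases h : pvOk s = true
    · have h2 : pvStep (some b) s
          = some (if s.toList.length > b.toList.length then s else b) := by
        simp only [pvStep, h, if_pos]
        split <;> rfl
      rw [List.foldl_cons, List.foldl_cons, if_pos h, h2]
      exact ih _
    · have h2 : pvStep (some b) s = some b := by simp [pvStep, h]
      rw [List.foldl_cons, List.foldl_cons, if_neg h, h2]
      exact ih b

theorem pvA_eq_optFold (l : List String) :
    longest_vowel_string l = (l.foldl pvStep none).getD "" := by
  unfold longest_vowel_string
  rw [pvFun_eq]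
  induction l with
  | nil => rfl
  | cons s l ih =>
    by_cases h : pvOk s = true
    · have hlen : 0 < s.toList.length := by
        rw [pvOk_eq] at h
        have hA := Bool.and_elim_left h
        unfold pvAGuard at hA
        have h3 : decide (s.toList.length > 3) = true := Bool.and_elim_left hA
        rw [decide_eq_true_eq] at h3; omega
      have hfirst : (if s.toList.length > ("" : String).toList.length then s else "") = s := by
        have h0 : ("" : String).toList.length = 0 := rfl
        rw [h0, if_pos hlen]
      have h2 : pvStep none s = some s := by simp [pvStep, h]
      rw [List.foldl_cons, List.foldl_cons, if_pos h, hfirst, h2]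
      exact pvFold_some l s
    · have h2 : pvStep none s = none := by simp [pvStep, h]
      rw [List.foldl_cons, List.foldl_cons, if_neg h, h2]
      exact ih

-- insertBy unfolds one step at a time
theorem pvInsertBy_cons (before : String → String → Bool) (x y : String) (ys : List String) :
    PySem.List.insertBy before x (y :: ys) =
      if before x y then x :: y :: ys else y :: PySem.List.insertBy before x ys := rfl

-- inserting x into a length-descending list: its effect on the first qualifying element
theorem pvFind_insertBy (x : String) (S : List String)
    (hs : S.Pairwise (fun a b => PySem.Str.len b ≤ PySem.Str.len a)) :
    (PySem.List.insertBy (fun a b => decide (PySem.Str.len b < PySem.Str.len a)) x S).find? pvOk =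
      pvStep (S.find? pvOk) x := by
  induction S with
  | nil =>
    show List.find? pvOk [x] = pvStep none x
    cases hox : pvOk x <;> simp [List.find?, pvStep, hox]
  | cons y ys ih =>
    rcases List.pairwise_cons.mp hs with ⟨hy, hp⟩
    rw [pvInsertBy_cons]
    by_cases hb : decide (PySem.Str.len y < PySem.Str.len x) = true
    · rw [if_pos hb]
      cases hox : pvOk x with
      | false =>
        rw [List.find?_cons_of_neg (by simp [hox])]
        simp [pvStep, hox]
      | true =>
        rw [List.find?_cons_of_pos hox]
        cases hfind : List.find? pvOk (y :: ys) with
        | none => simp [pvStep, hox]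
        | some m =>
          have hm : m ∈ y :: ys := List.mem_of_find?_eq_some hfind
          have hlen : PySem.Str.len m ≤ PySem.Str.len y := by
            rcases List.mem_cons.mp hm with h1 | h2
            · exact h1 ▸ le_refl _
            · exact hy m h2
          have hlt := lt_of_le_of_lt hlen (of_decide_eq_true hb)
          have hnat : m.length < x.length := by
            simp only [PySem.Str.len, Int.ofNat_lt, String.length_toList] at hlt
            exact_mod_cast hlt
          simp [pvStep, hox, hnat]
    · rw [if_neg hb]
      have hle : PySem.Str.len x ≤ PySem.Str.len y := not_lt.mp (by simpa using hb)
      cases hoy : pvOk y with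
      | true =>
        rw [List.find?_cons_of_pos hoy, List.find?_cons_of_pos hoy]
        have hnat : ¬ x.length > y.length := by
          simp only [PySem.Str.len, String.length_toList] at hle
          have h' : x.length ≤ y.length := by exact_mod_cast hle
          omega
        cases hox : pvOk x <;> simp [pvStep, hox, hnat]
      | false =>
        rw [List.find?_cons_of_neg (by simp [hoy]), List.find?_cons_of_neg (by simp [hoy])]
        exact ih hp
theorem pvMain (l : List String) :
    longest_vowel_string l = longest_vowel_string_alt l := by
  unfold longest_vowel_string_alt
  rw [pvA_eq_optFold]
  congr 1
  induction l using List.reverseRecOn with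
  | nil => rfl
  | append_singleton l x ih =>
    rw [List.foldl_append,
        PySem.List.sorted_rev_eq_foldl_insertBy (l ++ [x]) (fun s => PySem.Str.len s),
        List.foldl_append,
        ← PySem.List.sorted_rev_eq_foldl_insertBy l (fun s => PySem.Str.len s)]
    simp only [List.foldl]
    rw [pvFind_insertBy x _ (PySem.List.sorted_pairwise_rev l (fun s => PySem.Str.len s)), ih]

theorem longest_vowel_string_spec : Claim_equal_longest_vowel_string := by
  intro strings _
  unfold Spec_longest_vowel_string
  exact pvMain strings
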